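-- pv_equiv track=rewrite | github.com/pypi-data/pypi-mirror-403 | packages/csclib-tfhe/csclib_tfhe-202601251-cp313-cp313-manylinux_2_34_x86_64.whl/csclib_tfhe/benes.py | rlex
-- ===== SOURCE A (Python) =====
-- def rlex(x, d):
--   if d == 0:
--     return x
--
--   if (x >> d) & 1: # 下半分
--     x = x ^ 1
--   if x & 1 == 1:
--     return rlex(x // 2, d - 1) + (1 << d)
--   else:
--     return rlex(x // 2, d - 1)
-- ===== SOURCE B (Python) =====
-- def rlex(x, d):
--     # Closed form: base value x >> d, plus each bit (x>>k)&1 XOR-twisted by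
--     # the top bit (x>>d)&1, placed at position d-k.  (x >> d raises the same
--     # ValueError as A for negative d.)
--     t = (x >> d) & 1
--     return (x >> d) + sum((((x >> k) & 1) ^ t) << (d - k) for k in range(d))
-- ===== Notes on version B (the rewrite author's own statement) =====
-- stated objective: simpler
-- what changed: Replaced A's per-level recursion (conditional bit flip, split on the low bit, recurse on x//2) by a non-recursive closed form: x>>d plus a single sum placing each bit (x>>k)&1 XOR the top bit (x>>d)&1 at position d-k.
import Mathlib
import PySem

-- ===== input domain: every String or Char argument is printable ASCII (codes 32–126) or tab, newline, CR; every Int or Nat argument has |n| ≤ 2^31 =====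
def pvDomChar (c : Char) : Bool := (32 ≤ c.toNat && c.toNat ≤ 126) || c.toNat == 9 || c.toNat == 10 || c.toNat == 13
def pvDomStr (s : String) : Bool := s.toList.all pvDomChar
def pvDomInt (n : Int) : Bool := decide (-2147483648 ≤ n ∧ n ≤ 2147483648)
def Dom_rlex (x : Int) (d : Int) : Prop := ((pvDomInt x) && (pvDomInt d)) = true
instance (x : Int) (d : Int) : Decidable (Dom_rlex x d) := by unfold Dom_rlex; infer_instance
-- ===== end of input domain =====

-- B replaces A's per-level recursion by a non-recursive closed-form sum of twisted bits; objective: simpler.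


-- ===== PORT A =====
-- Literal port of A's recursion; the 'd < 0' guard only totalises the
-- recursion where Python's 'x >> d' raises ValueError (excluded by Pre_rlex).
def rlex (x : Int) (d : Int) : Int :=
  if d = 0 then x
  else if d < 0 then 0
  else
    let x' := if PySem.Int.band (x >>> d.toNat) 1 ≠ 0 then PySem.Int.bxor x 1 else x
    if PySem.Int.band x' 1 = 1 then
      rlex (PySem.Int.floordiv x' 2) (d - 1) + (1 <<< d.toNat)
    else
      rlex (PySem.Int.floordiv x' 2) (d - 1)
termination_by d.toNat
decreasing_by all_goals omega

-- ===== PORT B =====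
def rlex_alt (x : Int) (d : Int) : Int :=
  if d < 0 then 0   -- Python raises ValueError here (excluded by Pre_rlex)
  else
    let t := PySem.Int.band (x >>> d.toNat) 1
    (x >>> d.toNat) +
      (List.range d.toNat).foldl
        (fun (acc : Int) (k : Nat) => acc + (PySem.Int.bxor (PySem.Int.band (x >>> k) 1) t) <<< (d.toNat - k)) 0

-- ===== PRECONDITION & SPEC =====
-- Pre_ excludes d < 0, where Python's 'x >> d' raises ValueError (in A and in B).
def Pre_rlex (x : Int) (d : Int) : Prop := 0 ≤ d
instance (x : Int) (d : Int) : Decidable (Pre_rlex x d) := by unfold Pre_rlex; infer_instance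
def pvWitness_rlex : Int × Int := (5, 2)
def Spec_rlex (x : Int) (d : Int) (out : Int) : Prop := out = rlex_alt x d
instance (x : Int) (d : Int) (out : Int) : Decidable (Spec_rlex x d out) := by unfold Spec_rlex; infer_instance

-- ===== CLAIM (what is proved, stated in full; the proofs are below) =====
def Claim_equal_rlex : Prop := ∀ (x : Int) (d : Int), Dom_rlex x d → Pre_rlex x d → Spec_rlex x d (rlex x d)

-- ===== LEMMAS AND PROOFS =====

lemma ofNat_sr (m : Nat) (n : Nat) : (Int.ofNat m) >>> n = Int.ofNat (m >>> n) := rfl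
lemma negSucc_sr (m : Nat) (n : Nat) : (Int.negSucc m) >>> n = Int.negSucc (m >>> n) := rfl
lemma fdiv_ofNat2 (m : Nat) : Int.fdiv (Int.ofNat m) 2 = Int.ofNat (m / 2) := by
  cases m <;> rfl
lemma fdiv_negSucc2 (m : Nat) : Int.fdiv (Int.negSucc m) 2 = Int.negSucc (m / 2) := rfl

lemma sr0 (a : Int) : a >>> (0:Nat) = a := by
  cases a <;> simp

lemma sr1_fdiv (a : Int) : a >>> (1:Nat) = Int.fdiv a 2 := by
  cases a
  · rw [ofNat_sr, fdiv_ofNat2, Nat.shiftRight_eq_div_pow]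
  · rw [negSucc_sr, fdiv_negSucc2, Nat.shiftRight_eq_div_pow]

lemma sr1_sr (a : Int) (k : Nat) : (a >>> (1:Nat)) >>> k = a >>> (k+1) := by
  cases a
  · rw [ofNat_sr, ofNat_sr, ofNat_sr, ← Nat.shiftRight_add, Nat.add_comm]
  · rw [negSucc_sr, negSucc_sr, negSucc_sr, ← Nat.shiftRight_add, Nat.add_comm]

lemma fdiv2_ediv (a : Int) : Int.fdiv a 2 = a / 2 := by
  rw [Int.fdiv_eq_ediv]; norm_num

lemma band_one_emod (a : Int) : PySem.Int.band a 1 = a % 2 := by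
  rw [PySem.Int.band_one]
  simp [PySem.Int.mod, Int.fmod_eq_emod]

lemma nat_xor_one (n : Nat) : n ^^^ 1 = if n % 2 = 0 then n + 1 else n - 1 := by
  apply Nat.eq_of_testBit_eq
  intro i
  rw [Nat.testBit_xor]
  cases i with
  | zero =>
    rw [Nat.testBit_zero, Nat.testBit_zero, Nat.testBit_zero]
    rcases Nat.mod_two_eq_zero_or_one n with h | h <;> simp [h] <;> omega
  | succ j =>
    rw [Nat.testBit_add_one, Nat.testBit_add_one, Nat.testBit_add_one]
    have h1 : (1:Nat)/2 = 0 := rfl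
    rw [h1]
    have h2 : (if n % 2 = 0 then n + 1 else n - 1)/2 = n/2 := by split <;> omega
    rw [h2]; simp

lemma int_bxor_one (x : Int) : PySem.Int.bxor x 1 = if x % 2 = 0 then x + 1 else x - 1 := by
  unfold PySem.Int.bxor
  have h1 : ((1:Int)).toNat = 1 := rfl
  split <;> rename_i h
  · rw [if_pos (by norm_num : (0:Int) ≤ 1), h1, nat_xor_one]
    rcases Int.emod_two_eq_zero_or_one x with hp | hp
    · have h2 : x.toNat % 2 = 0 := by omega
      simp only [h2, hp]
      norm_num; omega
    · have h2 : x.toNat % 2 = 1 := by omega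
      rw [hp]; simp only [h2]
      norm_num; omega
  · rw [if_pos (by norm_num : (0:Int) ≤ 1), h1, nat_xor_one]
    rcases Int.emod_two_eq_zero_or_one x with hp | hp
    · have h2 : (-x-1).toNat % 2 = 1 := by omega
      rw [hp]; simp only [h2]
      norm_num; omega
    · have h2 : (-x-1).toNat % 2 = 0 := by omega
      rw [hp]; simp only [h2]
      norm_num; omega

lemma fdiv_flip (x : Int) : Int.fdiv (PySem.Int.bxor x 1) 2 = Int.fdiv x 2 := by
  rw [int_bxor_one, fdiv2_ediv, fdiv2_ediv]
  rcases Int.emod_two_eq_zero_or_one x with hp | hp <;> simp [hp] <;> omega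

lemma band_flip (x : Int) : PySem.Int.band (PySem.Int.bxor x 1) 1 = 1 - PySem.Int.band x 1 := by
  rw [int_bxor_one, band_one_emod, band_one_emod]
  rcases Int.emod_two_eq_zero_or_one x with hp | hp <;> simp [hp] <;> omega

lemma foldl_add_sum (f : Nat → Int) (n : Nat) (init : Int) :
    (List.range n).foldl (fun acc k => acc + f k) init = init + ∑ k ∈ Finset.range n, f k := by
  induction n generalizing init with
  | zero => simp
  | succ m ih =>
    rw [List.range_succ, List.foldl_append, ih, Finset.sum_range_succ]
    simp [add_assoc]

lemma alt_sum (x : Int) (n : Nat) :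
    rlex_alt x (n : Int) = x >>> n +
      ∑ k ∈ Finset.range n,
        (PySem.Int.bxor (PySem.Int.band (x >>> k) 1) (PySem.Int.band (x >>> n) 1)) <<< (n - k) := by
  unfold rlex_alt
  rw [if_neg (by omega)]
  have h : ((n : Int)).toNat = n := Int.toNat_natCast n
  rw [h]
  simp only [foldl_add_sum, zero_add]

lemma alt_step (n : Nat) (x : Int) :
    rlex_alt x ((n+1 : Nat) : Int) =
      (PySem.Int.bxor (PySem.Int.band x 1) (PySem.Int.band (x >>> (n+1)) 1)) <<< (n+1) +
        rlex_alt (Int.fdiv x 2) (n : Int) := by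
  rw [alt_sum, alt_sum, ← sr1_fdiv]
  rw [Finset.sum_range_succ']
  simp only [sr1_sr, sr0, Nat.sub_zero, Nat.succ_sub_succ]
  ring

lemma band_one_cases (a : Int) : PySem.Int.band a 1 = 0 ∨ PySem.Int.band a 1 = 1 := by
  rw [band_one_emod]; omega

lemma one_shl (k : Nat) : ((1 <<< k : Nat) : Int) = (1 : Int) <<< k := rfl

lemma rlex_step (n : Nat) (x : Int) :
    rlex x ((n+1 : Nat) : Int) =
      rlex (Int.fdiv x 2) (n : Int) +
        (PySem.Int.bxor (PySem.Int.band x 1) (PySem.Int.band (x >>> (n+1)) 1)) <<< (n+1) := by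
  rw [rlex]
  rw [if_neg (by omega), if_neg (by omega)]
  have htn : ((n+1 : Nat) : Int).toNat = n + 1 := by omega
  have hd1 : ((n+1 : Nat) : Int) - 1 = (n : Int) := by push_cast; omega
  simp only [htn, hd1, PySem.Int.floordiv, one_shl]
  rcases band_one_cases (x >>> (n+1)) with hb | hb <;>
    rcases band_one_cases x with ht | ht
  · rw [show (if PySem.Int.band (x >>> (n+1)) 1 ≠ 0 then PySem.Int.bxor x 1 else x) = x
        from if_neg (by simp [hb])]
    rw [if_neg (by rw [ht]; norm_num), ht, hb]
    rw [show PySem.Int.bxor 0 0 = 0 from by decide]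
    simp
  · rw [show (if PySem.Int.band (x >>> (n+1)) 1 ≠ 0 then PySem.Int.bxor x 1 else x) = x
        from if_neg (by simp [hb])]
    rw [if_pos ht, ht, hb]
    rw [show PySem.Int.bxor 1 0 = 1 from by decide]
  · rw [show (if PySem.Int.band (x >>> (n+1)) 1 ≠ 0 then PySem.Int.bxor x 1 else x)
        = PySem.Int.bxor x 1 from if_pos (by rw [hb]; norm_num)]
    rw [if_pos (by rw [band_flip, ht]; norm_num), fdiv_flip, ht, hb]
    rw [show PySem.Int.bxor 0 1 = 1 from by decide]
  · rw [show (if PySem.Int.band (x >>> (n+1)) 1 ≠ 0 then PySem.Int.bxor x 1 else x)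
        = PySem.Int.bxor x 1 from if_pos (by rw [hb]; norm_num)]
    rw [if_neg (by rw [band_flip, ht]; norm_num), fdiv_flip, ht, hb]
    rw [show PySem.Int.bxor 1 1 = 0 from by decide]
    simp

lemma rlex_eq_alt (n : Nat) (x : Int) : rlex x (n : Int) = rlex_alt x (n : Int) := by
  induction n generalizing x with
  | zero =>
    rw [rlex, alt_sum]
    norm_num [sr0]
  | succ m ih =>
    rw [rlex_step, alt_step, ih]
    ring

-- ===== VERDICT (by name: the statement is the Claim_ definition above) =====
theorem rlex_spec : Claim_equal_rlex := by
  intro x d _ hpre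
  have hd : 0 ≤ d := hpre
  unfold Spec_rlex
  obtain ⟨n, rfl⟩ : ∃ n : Nat, d = (n : Int) := ⟨d.toNat, by omega⟩
  exact rlex_eq_alt n x
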